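-- pv_equiv track=rewrite | github.com/yandex-cloud/examples | ai/stt_client/stt_runner.py | is_format_supported
-- ===== SOURCE A (Python) =====
-- import collections
--
-- def is_format_supported(audio_info):
--     supported_formats = [
--         {
--             'Format': 'PCM',
--             'Format_Settings_Endianness': 'Little',
--             'Format_Settings_Sign': 'Signed',
--             'BitDepth': '16',
--             'Channels': '1',
--             'SamplingRate': ['8000', '16000', '32000'],
--         },
--         {
--             'Format': 'Opus',
--             'Channels': '1',
--         },
--     ]
--     for supported_format in supported_formats:
--         supported = True
--         for key in supported_format:
--             if isinstance(supported_format[key], str):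
--                 if audio_info[key] != supported_format[key]:
--                     supported = False
--                     break
--             elif isinstance(supported_format[key], collections.abc.Iterable):
--                 if not audio_info[key] in supported_format[key]:
--                     supported = False
--                     break
--         if supported:
--             return True
--     return False
-- ===== SOURCE B (Python) =====
-- def is_format_supported(audio_info):
--     if (audio_info['Format'] == 'PCM'
--             and audio_info['Format_Settings_Endianness'] == 'Little'
--             and audio_info['Format_Settings_Sign'] == 'Signed'
--             and audio_info['BitDepth'] == '16'
--             and audio_info['Channels'] == '1'
--             and audio_info['SamplingRate'] in ('8000', '16000', '32000')):
--         return True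
--     return audio_info['Format'] == 'Opus' and audio_info['Channels'] == '1'
-- ===== Notes on version B (the rewrite author's own statement) =====
-- stated objective: simpler
-- what changed: Replaces the table of format dicts interpreted by a nested loop with isinstance dispatch by two direct short-circuiting boolean conditions (PCM chain, then Opus), keeping the same key-access order so KeyErrors occur at the same keys.
import Mathlib
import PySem

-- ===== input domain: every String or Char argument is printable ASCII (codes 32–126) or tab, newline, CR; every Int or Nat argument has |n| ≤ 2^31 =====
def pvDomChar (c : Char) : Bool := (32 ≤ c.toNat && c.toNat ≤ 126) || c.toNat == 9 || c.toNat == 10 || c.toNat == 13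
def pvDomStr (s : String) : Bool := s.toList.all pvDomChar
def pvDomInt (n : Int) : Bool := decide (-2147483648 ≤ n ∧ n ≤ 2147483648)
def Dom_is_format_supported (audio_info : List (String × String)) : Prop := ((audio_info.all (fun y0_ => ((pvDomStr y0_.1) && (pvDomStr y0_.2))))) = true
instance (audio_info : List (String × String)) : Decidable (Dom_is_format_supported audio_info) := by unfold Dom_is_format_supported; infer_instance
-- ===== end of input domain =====

-- One honest line: B replaces A's table-of-dicts interpreted by a nested loop with two
-- direct short-circuiting boolean conditions in the same key order (objective: simpler).

-- ===== PORT A =====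
-- the supported_formats table: each entry value is either a string (.inl) or a list of strings (.inr)
def pvSupportedFormats : List (List (String × (String ⊕ List String))) :=
  [ [ ("Format", Sum.inl "PCM"),
      ("Format_Settings_Endianness", Sum.inl "Little"),
      ("Format_Settings_Sign", Sum.inl "Signed"),
      ("BitDepth", Sum.inl "16"),
      ("Channels", Sum.inl "1"),
      ("SamplingRate", Sum.inr ["8000", "16000", "32000"]) ],
    [ ("Format", Sum.inl "Opus"),
      ("Channels", Sum.inl "1") ] ]

-- inner 'for key in supported_format' loop; a missing key is Python's KeyError (excluded by Pre_),
-- the port returns false there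
def pvCheckFormat (audio_info : List (String × String)) :
    List (String × (String ⊕ List String)) → Bool
  | [] => true
  | (k, Sum.inl s) :: rest =>
      match audio_info.lookup k with
      | none => false
      | some v => if v ≠ s then false else pvCheckFormat audio_info rest
  | (k, Sum.inr l) :: rest =>
      match audio_info.lookup k with
      | none => false
      | some v => if ¬ (v ∈ l) then false else pvCheckFormat audio_info rest

-- outer 'for supported_format in supported_formats' loop
def pvFormatsLoop (audio_info : List (String × String)) :
    List (List (String × (String ⊕ List String))) → Bool
  | [] => false
  | f :: rest => if pvCheckFormat audio_info f then true else pvFormatsLoop audio_info rest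

def is_format_supported (audio_info : List (String × String)) : Bool :=
  pvFormatsLoop audio_info pvSupportedFormats

-- ===== PORT B =====
def is_format_supported_alt (audio_info : List (String × String)) : Bool :=
  if (audio_info.lookup "Format" == some "PCM"
      && audio_info.lookup "Format_Settings_Endianness" == some "Little"
      && audio_info.lookup "Format_Settings_Sign" == some "Signed"
      && audio_info.lookup "BitDepth" == some "16"
      && audio_info.lookup "Channels" == some "1"
      && (audio_info.lookup "SamplingRate").any (["8000", "16000", "32000"].contains ·))
  then true
  else audio_info.lookup "Format" == some "Opus" && audio_info.lookup "Channels" == some "1"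

-- ===== PRECONDITION & SPEC =====
-- Pre_ excludes exactly the inputs where A raises KeyError: a key is missing at the point
-- the check sequence reaches it (both programs access keys in the same order).
def pvPreB (d : List (String × String)) : Bool :=
  match d.lookup "Format" with
  | none => false
  | some f =>
    if f = "PCM" then
      match d.lookup "Format_Settings_Endianness" with
      | none => false
      | some e =>
        if e ≠ "Little" then true else
        match d.lookup "Format_Settings_Sign" with
        | none => false
        | some s =>
          if s ≠ "Signed" then true else
          match d.lookup "BitDepth" with
          | none => false
          | some b =>
            if b ≠ "16" then true else
            match d.lookup "Channels" with
            | none => false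
            | some c =>
              if c ≠ "1" then true else (d.lookup "SamplingRate").isSome
    else if f = "Opus" then (d.lookup "Channels").isSome
    else true

def Pre_is_format_supported (audio_info : List (String × String)) : Prop :=
  pvPreB audio_info = true
instance (audio_info : List (String × String)) : Decidable (Pre_is_format_supported audio_info) := by
  unfold Pre_is_format_supported; infer_instance

def pvWitness_is_format_supported : (List (String × String)) :=
  [("Format", "Opus"), ("Channels", "1")]

def Spec_is_format_supported (audio_info : List (String × String)) (out : Bool) : Prop := out = is_format_supported_alt audio_info
instance (audio_info : List (String × String)) (out : Bool) : Decidable (Spec_is_format_supported audio_info out) := by unfold Spec_is_format_supported; infer_instance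

-- ===== CLAIM (what is proved, stated in full; the proofs are below) =====
def Claim_equal_is_format_supported : Prop := ∀ (audio_info : List (String × String)), Dom_is_format_supported audio_info → Pre_is_format_supported audio_info → Spec_is_format_supported audio_info (is_format_supported audio_info)

-- ===== LEMMAS AND PROOFS =====

-- ===== VERDICT (by name: the statement is the Claim_ definition above) =====
theorem is_format_supported_spec : Claim_equal_is_format_supported := by
  intro d _ hpre
  unfold Spec_is_format_supported is_format_supported is_format_supported_alt
  unfold Pre_is_format_supported pvPreB at hpre
  simp only [pvFormatsLoop, pvSupportedFormats, pvCheckFormat]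
  cases hF : d.lookup "Format" with
  | none => simp [hF] at hpre
  | some f =>
    simp only [hF] at hpre ⊢
    by_cases hfp : f = "PCM"
    · subst hfp
      simp only [if_pos rfl] at hpre
      cases hE : d.lookup "Format_Settings_Endianness" with
      | none => simp [hE] at hpre
      | some e =>
        simp only [hE] at hpre ⊢
        by_cases he : e = "Little"
        · subst he
          simp only [ne_eq, not_true_eq_false, if_false] at hpre
          cases hS : d.lookup "Format_Settings_Sign" with
          | none => simp [hS] at hpre
          | some s =>
            simp only [hS] at hpre ⊢
            by_cases hs : s = "Signed"
            · subst hs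
              simp only [ne_eq, not_true_eq_false, if_false] at hpre
              cases hB : d.lookup "BitDepth" with
              | none => simp [hB] at hpre
              | some b =>
                simp only [hB] at hpre ⊢
                by_cases hb : b = "16"
                · subst hb
                  simp only [ne_eq, not_true_eq_false, if_false] at hpre
                  cases hC : d.lookup "Channels" with
                  | none => simp [hC] at hpre
                  | some c =>
                    simp only [hC] at hpre ⊢
                    by_cases hc : c = "1"
                    · subst hc
                      simp only [ne_eq, not_true_eq_false, if_false] at hpre
                      cases hR : d.lookup "SamplingRate" with
                      | none => simp [hR] at hpre
                      | some r => by_cases hr : r ∈ ["8000", "16000", "32000"] <;> simp_all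
                    · simp [hc]
                · simp [hb]
            · simp [hs]
        · simp [he]
    · by_cases hfo : f = "Opus"
      · subst hfo
        rw [if_neg hfp, if_pos rfl] at hpre
        cases hC : d.lookup "Channels" with
        | none => simp [hC] at hpre
        | some c => by_cases hc : c = "1" <;> simp_all
      · simp [hfp, hfo]
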